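-- pv_equiv track=rewrite | github.com/ponvedica/Rogue-Access-Point-Detection-using-AI-1.0 | wifi_scanner.py | classify_security
-- ===== SOURCE A (Python) =====
-- def classify_security(auth_type):
--     """Improved security classification"""
--     if not auth_type:
--         return 'UNKNOWN'
--
--     auth_lower = auth_type.lower()
--
--     # WPA3
--     if 'wpa3' in auth_lower:
--         return 'WPA3'
--
--     # Enterprise
--     elif any(x in auth_lower for x in ['enterprise', '802.1x']):
--         return 'WPA2-ENTERPRISE'
--
--     # WPA2
--     elif any(x in auth_lower for x in ['wpa2', 'wpa2-personal']):
--         return 'WPA2'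
--
--     # WPA
--     elif 'wpa' in auth_lower:
--         return 'WPA'
--
--     # WEP
--     elif 'wep' in auth_lower:
--         return 'WEP'
--
--     # Open network
--     elif any(x in auth_lower for x in ['open', 'none']):
--         return 'OPEN'
--
--     else:
--         return 'UNKNOWN'
-- ===== SOURCE B (Python) =====
-- RANK = {'wpa3': 0, 'enterprise': 1, '802.1x': 1, 'wpa2': 2,
--         'wpa': 3, 'wep': 4, 'open': 5, 'none': 5}
-- CATS = ['WPA3', 'WPA2-ENTERPRISE', 'WPA2', 'WPA', 'WEP', 'OPEN', 'UNKNOWN']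
--
-- def classify_security(auth_type):
--     """Single left-to-right pass: keep the best (lowest) rank of any keyword
--     starting at each position, then index the category table."""
--     if not auth_type:
--         return 'UNKNOWN'
--     s = auth_type.lower()
--     best = 6
--     for i in range(len(s)):
--         for kw, r in RANK.items():
--             if r < best and s.startswith(kw, i):
--                 best = r
--     return CATS[best]
-- ===== Notes on version B (the rewrite author's own statement) =====
-- stated objective: alternative
-- what changed: Instead of A's staged elif chain of substring searches (one full scan per keyword group), B makes a single left-to-right pass over the string, maintaining the minimum priority rank of any keyword that starts at each position, and finally indexes a category table with that rank.
import Mathlib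
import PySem

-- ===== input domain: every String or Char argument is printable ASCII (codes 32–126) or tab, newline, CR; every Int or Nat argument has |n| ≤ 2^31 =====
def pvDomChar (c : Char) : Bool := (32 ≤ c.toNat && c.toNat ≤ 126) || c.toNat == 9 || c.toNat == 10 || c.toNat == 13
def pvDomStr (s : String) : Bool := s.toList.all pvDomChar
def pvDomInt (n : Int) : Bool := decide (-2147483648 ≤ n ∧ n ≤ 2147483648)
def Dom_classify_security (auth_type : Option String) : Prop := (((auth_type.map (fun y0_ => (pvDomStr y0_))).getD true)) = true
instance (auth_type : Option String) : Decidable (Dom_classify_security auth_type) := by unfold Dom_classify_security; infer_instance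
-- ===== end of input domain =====

-- B replaces A's staged elif chain of substring searches by one left-to-right pass that keeps the
-- minimum priority rank of any keyword starting at each position, then indexes a category table (alternative, same cost).


-- ===== PORT A =====
def classify_security (auth_type : Option String) : String :=
  match auth_type with
  | none => "UNKNOWN"
  | some s =>
    if s = "" then "UNKNOWN"
    else
      let auth_lower := PySem.Str.lower s
      if PySem.Str.isIn "wpa3" auth_lower then "WPA3"
      else if ["enterprise", "802.1x"].any (fun x => PySem.Str.isIn x auth_lower) then "WPA2-ENTERPRISE"
      else if ["wpa2", "wpa2-personal"].any (fun x => PySem.Str.isIn x auth_lower) then "WPA2"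
      else if PySem.Str.isIn "wpa" auth_lower then "WPA"
      else if PySem.Str.isIn "wep" auth_lower then "WEP"
      else if ["open", "none"].any (fun x => PySem.Str.isIn x auth_lower) then "OPEN"
      else "UNKNOWN"

-- ===== PORT B =====
-- RANK: insertion-ordered keyword → priority rank table (Python dict of Source B)
def pvRankTable : List (String × Nat) :=
  [("wpa3", 0), ("enterprise", 1), ("802.1x", 1), ("wpa2", 2), ("wpa", 3), ("wep", 4), ("open", 5), ("none", 5)]

def pvCats : List String := ["WPA3", "WPA2-ENTERPRISE", "WPA2", "WPA", "WEP", "OPEN", "UNKNOWN"]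

-- body of the inner loop: `if r < best and s.startswith(kw, i): best = r`
-- (s.startswith(kw, i) with 0 ≤ i is exactly `kw` being a prefix of the drop at i)
def pvStep (L : List Char) (i : Int) (b : Nat) (kr : String × Nat) : Nat :=
  if kr.2 < b ∧ PySem.Chars.startswith (L.drop i.toNat) kr.1.toList then kr.2 else b

-- body of the outer loop over positions i
def pvOuter (L : List Char) (b : Nat) (i : Int) : Nat := pvRankTable.foldl (pvStep L i) b

-- the whole `best` loop of Source B
def pvBest (L : List Char) : Nat :=
  (PySem.List.pyRange 0 (L.length : Int) 1).foldl (pvOuter L) 6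

def classify_security_alt (auth_type : Option String) : String :=
  match auth_type with
  | none => "UNKNOWN"
  | some s =>
    if s = "" then "UNKNOWN"
    else (PySem.List.pyGet? pvCats ((pvBest (PySem.Str.lower s).toList : Nat) : Int)).getD "UNKNOWN"

-- ===== PRECONDITION & SPEC =====
def Spec_classify_security (auth_type : Option String) (out : String) : Prop := out = classify_security_alt auth_type
instance (auth_type : Option String) (out : String) : Decidable (Spec_classify_security auth_type out) := by unfold Spec_classify_security; infer_instance

-- ===== CLAIM (what is proved, stated in full; the proofs are below) =====
def Claim_equal_classify_security : Prop := ∀ (auth_type : Option String), Dom_classify_security auth_type → Spec_classify_security auth_type (classify_security auth_type)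

-- ===== LEMMAS AND PROOFS =====

theorem pvStep_le (L : List Char) (i : Int) (b : Nat) (kr : String × Nat) : pvStep L i b kr ≤ b := by
  unfold pvStep; split_ifs with h
  · exact Nat.le_of_lt h.1
  · exact Nat.le_refl b

theorem innerFold_le (L : List Char) (i : Int) (t : List (String × Nat)) (b : Nat) :
    t.foldl (pvStep L i) b ≤ b := by
  induction t generalizing b with
  | nil => simp
  | cons x xs ih => exact Nat.le_trans (ih (pvStep L i b x)) (pvStep_le L i b x)

theorem outerFold_le (L : List Char) (I : List Int) (b : Nat) :
    I.foldl (pvOuter L) b ≤ b := by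
  induction I generalizing b with
  | nil => simp
  | cons x xs ih => exact Nat.le_trans (ih (pvOuter L b x)) (innerFold_le L x pvRankTable b)

theorem innerFold_le_mem (L : List Char) (i : Int) (t : List (String × Nat)) (b : Nat)
    (kr : String × Nat) (hm : kr ∈ t)
    (hc : PySem.Chars.startswith (L.drop i.toNat) kr.1.toList = true) :
    t.foldl (pvStep L i) b ≤ kr.2 := by
  induction t generalizing b with
  | nil => cases hm
  | cons x xs ih =>
    rcases List.mem_cons.mp hm with rfl | hm'
    · refine Nat.le_trans (innerFold_le L i xs (pvStep L i b kr)) ?_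
      unfold pvStep
      split_ifs with h
      · exact Nat.le_refl _
      · by_cases hb : kr.2 < b
        · exact absurd ⟨hb, hc⟩ h
        · exact Nat.le_of_not_lt hb
    · exact ih (pvStep L i b x) hm'

theorem outerFold_le_mem (L : List Char) (I : List Int) (b : Nat) (i : Int) (hi : i ∈ I)
    (kr : String × Nat) (hm : kr ∈ pvRankTable)
    (hc : PySem.Chars.startswith (L.drop i.toNat) kr.1.toList = true) :
    I.foldl (pvOuter L) b ≤ kr.2 := by
  induction I generalizing b with
  | nil => cases hi
  | cons x xs ih =>
    rcases List.mem_cons.mp hi with rfl | hi'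
    · exact Nat.le_trans (outerFold_le L xs (pvOuter L b i)) (innerFold_le_mem L i pvRankTable b kr hm hc)
    · exact ih (pvOuter L b x) hi'

theorem innerFold_cases (L : List Char) (i : Int) (t : List (String × Nat)) (b : Nat) :
    t.foldl (pvStep L i) b = b ∨
      ∃ kr ∈ t, PySem.Chars.startswith (L.drop i.toNat) kr.1.toList = true ∧
        t.foldl (pvStep L i) b = kr.2 := by
  induction t generalizing b with
  | nil => exact Or.inl rfl
  | cons x xs ih =>
    rcases ih (pvStep L i b x) with h | ⟨kr, hm, hc, he⟩
    · simp only [List.foldl_cons] at *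
      by_cases hx : x.2 < b ∧ PySem.Chars.startswith (L.drop i.toNat) x.1.toList = true
      · refine Or.inr ⟨x, List.mem_cons_self, hx.2, ?_⟩
        rw [h]; unfold pvStep; simp [hx]
      · left; rw [h]; unfold pvStep; simp only [if_neg hx]
    · exact Or.inr ⟨kr, List.mem_cons_of_mem _ hm, hc, he⟩

theorem outerFold_cases (L : List Char) (I : List Int) (b : Nat) :
    I.foldl (pvOuter L) b = b ∨
      ∃ i ∈ I, ∃ kr ∈ pvRankTable, PySem.Chars.startswith (L.drop i.toNat) kr.1.toList = true ∧
        I.foldl (pvOuter L) b = kr.2 := by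
  induction I generalizing b with
  | nil => exact Or.inl rfl
  | cons x xs ih =>
    rcases ih (pvOuter L b x) with h | ⟨i, hi, kr, hm, hc, he⟩
    · simp only [List.foldl_cons] at *
      rcases innerFold_cases L x pvRankTable b with h2 | ⟨kr, hm, hc, he⟩
      · left; rw [h]; exact h2
      · exact Or.inr ⟨x, List.mem_cons_self, kr, hm, hc, by rw [h]; exact he⟩
    · exact Or.inr ⟨i, List.mem_cons_of_mem _ hi, kr, hm, hc, he⟩

theorem pvBest_le (L : List Char) (kw : String) (r : Nat) (hm : (kw, r) ∈ pvRankTable)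
    (hne : kw.toList ≠ []) (hh : PySem.Chars.isIn kw.toList L = true) : pvBest L ≤ r := by
  obtain ⟨j, hpre⟩ := (PySem.Chars.exists_prefix_drop_iff_isIn kw.toList L).mpr hh
  have hjlen : j < L.length := by
    by_contra hj
    have : L.drop j = [] := List.drop_eq_nil_of_le (Nat.le_of_not_lt hj)
    rw [this] at hpre
    exact hne (List.prefix_nil.mp hpre)
  have hi : (j : Int) ∈ PySem.List.pyRange 0 (L.length : Int) 1 := by
    rw [PySem.List.mem_pyRange_one]
    constructor
    · exact_mod_cast Nat.zero_le j
    · exact_mod_cast hjlen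
  have hc : PySem.Chars.startswith (L.drop ((j : Int)).toNat) kw.toList = true := by
    rw [Int.toNat_natCast]
    exact (PySem.Chars.startswith_iff _ _).mpr hpre
  exact outerFold_le_mem L _ 6 (j : Int) hi (kw, r) hm hc

theorem pvBest_cases (L : List Char) :
    pvBest L = 6 ∨ ∃ kw r, ((kw : String), r) ∈ pvRankTable ∧
      PySem.Chars.isIn kw.toList L = true ∧ pvBest L = r := by
  rcases outerFold_cases L (PySem.List.pyRange 0 (L.length : Int) 1) 6 with h | ⟨i, _, kr, hm, hc, he⟩
  · exact Or.inl h
  · refine Or.inr ⟨kr.1, kr.2, hm, ?_, he⟩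
    exact (PySem.Chars.exists_prefix_drop_iff_isIn kr.1.toList L).mp
      ⟨i.toNat, (PySem.Chars.startswith_iff _ _).mp hc⟩

theorem table_cases {kw : String} {r : Nat} (h : (kw, r) ∈ pvRankTable) :
    (kw = "wpa3" ∧ r = 0) ∨ (kw = "enterprise" ∧ r = 1) ∨ (kw = "802.1x" ∧ r = 1) ∨
    (kw = "wpa2" ∧ r = 2) ∨ (kw = "wpa" ∧ r = 3) ∨ (kw = "wep" ∧ r = 4) ∨
    (kw = "open" ∧ r = 5) ∨ (kw = "none" ∧ r = 5) := by
  simp only [pvRankTable, List.mem_cons, List.not_mem_nil, or_false, Prod.mk.injEq] at h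
  tauto

-- "wpa2-personal" in the string implies "wpa2" in the string
theorem wpa2p_imp (L : List Char) (h : PySem.Chars.isIn "wpa2-personal".toList L = true) :
    PySem.Chars.isIn "wpa2".toList L = true := by
  rw [PySem.Chars.isIn_iff_infix] at h ⊢
  exact List.IsInfix.trans (by decide) h

-- ===== VERDICT (by name: the statement is the Claim_ definition above) =====
theorem classify_security_spec : Claim_equal_classify_security := by
  intro auth_type _
  unfold Spec_classify_security
  cases auth_type with
  | none => rfl
  | some s =>
    by_cases hs : s = ""
    · simp [classify_security, classify_security_alt, hs]
    · simp only [classify_security, classify_security_alt, if_neg hs,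
        List.any_cons, List.any_nil, Bool.or_false, PySem.Str.isIn_eq]
      set L := (PySem.Str.lower s).toList with hL
      by_cases h3 : PySem.Chars.isIn "wpa3".toList L = true
      · have hb : pvBest L = 0 := Nat.le_zero.mp (pvBest_le L "wpa3" 0 (by decide) (by decide) h3)
        rw [if_pos h3, hb]; decide
      · rw [if_neg h3]
        simp only [Bool.not_eq_true] at h3
        by_cases hE : (PySem.Chars.isIn "enterprise".toList L = true) ∨
            (PySem.Chars.isIn "802.1x".toList L = true)
        · have hub : pvBest L ≤ 1 := by
            rcases hE with hE | hE
            · exact pvBest_le L "enterprise" 1 (by decide) (by decide) hE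
            · exact pvBest_le L "802.1x" 1 (by decide) (by decide) hE
          have hlb : 1 ≤ pvBest L := by
            rcases pvBest_cases L with h6 | ⟨kw, r, hm, hh, he⟩
            · omega
            · rcases table_cases hm with ⟨rfl, rfl⟩ | ⟨rfl, rfl⟩ | ⟨rfl, rfl⟩ | ⟨rfl, rfl⟩ |
                ⟨rfl, rfl⟩ | ⟨rfl, rfl⟩ | ⟨rfl, rfl⟩ | ⟨rfl, rfl⟩ <;>
                first | (rw [h3] at hh; cases hh) | omega
          have hb : pvBest L = 1 := Nat.le_antisymm hub hlb
          have : (PySem.Chars.isIn "enterprise".toList L || PySem.Chars.isIn "802.1x".toList L) = true := by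
            rcases hE with hE | hE
            · rw [hE]; rfl
            · rw [hE, Bool.or_true]
          rw [this, if_pos rfl, hb]; decide
        · push_neg at hE
          obtain ⟨hEe, hE8⟩ := hE
          simp only [Bool.not_eq_true] at hEe hE8
          rw [hEe, hE8]
          simp only [Bool.or_self, Bool.false_eq_true, if_false]
          by_cases h2 : PySem.Chars.isIn "wpa2".toList L = true
          · have hub : pvBest L ≤ 2 := pvBest_le L "wpa2" 2 (by decide) (by decide) h2
            have hlb : 2 ≤ pvBest L := by
              rcases pvBest_cases L with h6 | ⟨kw, r, hm, hh, he⟩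
              · omega
              · rcases table_cases hm with ⟨rfl, rfl⟩ | ⟨rfl, rfl⟩ | ⟨rfl, rfl⟩ | ⟨rfl, rfl⟩ |
                  ⟨rfl, rfl⟩ | ⟨rfl, rfl⟩ | ⟨rfl, rfl⟩ | ⟨rfl, rfl⟩ <;>
                  first
                    | (rw [h3] at hh; cases hh)
                    | (rw [hEe] at hh; cases hh)
                    | (rw [hE8] at hh; cases hh)
                    | omega
            have hb : pvBest L = 2 := Nat.le_antisymm hub hlb
            rw [h2]
            simp only [Bool.true_or, if_true, hb]; decide
          · simp only [Bool.not_eq_true] at h2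
            have h2p : PySem.Chars.isIn "wpa2-personal".toList L = false := by
              by_contra hcontra
              simp only [Bool.not_eq_false] at hcontra
              rw [wpa2p_imp L hcontra] at h2; cases h2
            rw [h2, h2p]
            simp only [Bool.or_self, Bool.false_eq_true, if_false]
            by_cases hW : PySem.Chars.isIn "wpa".toList L = true
            · have hub : pvBest L ≤ 3 := pvBest_le L "wpa" 3 (by decide) (by decide) hW
              have hlb : 3 ≤ pvBest L := by
                rcases pvBest_cases L with h6 | ⟨kw, r, hm, hh, he⟩
                · omega
                · rcases table_cases hm with ⟨rfl, rfl⟩ | ⟨rfl, rfl⟩ | ⟨rfl, rfl⟩ | ⟨rfl, rfl⟩ |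
                    ⟨rfl, rfl⟩ | ⟨rfl, rfl⟩ | ⟨rfl, rfl⟩ | ⟨rfl, rfl⟩ <;>
                    first
                      | (rw [h3] at hh; cases hh)
                      | (rw [hEe] at hh; cases hh)
                      | (rw [hE8] at hh; cases hh)
                      | (rw [h2] at hh; cases hh)
                      | omega
              have hb : pvBest L = 3 := Nat.le_antisymm hub hlb
              rw [if_pos hW, hb]; decide
            · simp only [Bool.not_eq_true] at hW
              rw [hW]
              simp only [Bool.false_eq_true, if_false]
              by_cases hP : PySem.Chars.isIn "wep".toList L = true
              · have hub : pvBest L ≤ 4 := pvBest_le L "wep" 4 (by decide) (by decide) hP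
                have hlb : 4 ≤ pvBest L := by
                  rcases pvBest_cases L with h6 | ⟨kw, r, hm, hh, he⟩
                  · omega
                  · rcases table_cases hm with ⟨rfl, rfl⟩ | ⟨rfl, rfl⟩ | ⟨rfl, rfl⟩ | ⟨rfl, rfl⟩ |
                      ⟨rfl, rfl⟩ | ⟨rfl, rfl⟩ | ⟨rfl, rfl⟩ | ⟨rfl, rfl⟩ <;>
                      first
                        | (rw [h3] at hh; cases hh)
                        | (rw [hEe] at hh; cases hh)
                        | (rw [hE8] at hh; cases hh)
                        | (rw [h2] at hh; cases hh)
                        | (rw [hW] at hh; cases hh)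
                        | omega
                have hb : pvBest L = 4 := Nat.le_antisymm hub hlb
                rw [if_pos hP, hb]; decide
              · simp only [Bool.not_eq_true] at hP
                rw [hP]
                simp only [Bool.false_eq_true, if_false]
                by_cases hO : (PySem.Chars.isIn "open".toList L = true) ∨
                    (PySem.Chars.isIn "none".toList L = true)
                · have hub : pvBest L ≤ 5 := by
                    rcases hO with hO | hO
                    · exact pvBest_le L "open" 5 (by decide) (by decide) hO
                    · exact pvBest_le L "none" 5 (by decide) (by decide) hO
                  have hlb : 5 ≤ pvBest L := by
                    rcases pvBest_cases L with h6 | ⟨kw, r, hm, hh, he⟩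
                    · omega
                    · rcases table_cases hm with ⟨rfl, rfl⟩ | ⟨rfl, rfl⟩ | ⟨rfl, rfl⟩ | ⟨rfl, rfl⟩ |
                        ⟨rfl, rfl⟩ | ⟨rfl, rfl⟩ | ⟨rfl, rfl⟩ | ⟨rfl, rfl⟩ <;>
                        first
                          | (rw [h3] at hh; cases hh)
                          | (rw [hEe] at hh; cases hh)
                          | (rw [hE8] at hh; cases hh)
                          | (rw [h2] at hh; cases hh)
                          | (rw [hW] at hh; cases hh)
                          | (rw [hP] at hh; cases hh)
                          | omega
                  have hb : pvBest L = 5 := Nat.le_antisymm hub hlb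
                  have : (PySem.Chars.isIn "open".toList L || PySem.Chars.isIn "none".toList L) = true := by
                    rcases hO with hO | hO
                    · rw [hO]; rfl
                    · rw [hO, Bool.or_true]
                  rw [this, if_pos rfl, hb]; decide
                · push_neg at hO
                  obtain ⟨hOo, hOn⟩ := hO
                  simp only [Bool.not_eq_true] at hOo hOn
                  have hb : pvBest L = 6 := by
                    rcases pvBest_cases L with h6 | ⟨kw, r, hm, hh, he⟩
                    · exact h6
                    · rcases table_cases hm with ⟨rfl, rfl⟩ | ⟨rfl, rfl⟩ | ⟨rfl, rfl⟩ | ⟨rfl, rfl⟩ |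
                        ⟨rfl, rfl⟩ | ⟨rfl, rfl⟩ | ⟨rfl, rfl⟩ | ⟨rfl, rfl⟩ <;>
                        first
                          | (rw [h3] at hh; cases hh)
                          | (rw [hEe] at hh; cases hh)
                          | (rw [hE8] at hh; cases hh)
                          | (rw [h2] at hh; cases hh)
                          | (rw [hW] at hh; cases hh)
                          | (rw [hP] at hh; cases hh)
                          | (rw [hOo] at hh; cases hh)
                          | (rw [hOn] at hh; cases hh)
                  rw [hOo, hOn]
                  simp only [Bool.or_self, Bool.false_eq_true, if_false, hb]; decide
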